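-- pv_equiv track=rewrite | github.com/alvins22/Kalshi_Bot_V1 | Library/CloudStorage/OneDrive-Personal/Downloads/AI_Hedgefund/draft_1/src/trading/smart_execution.py | split_uniform
-- ===== SOURCE A (Python) =====
-- from typing import Dict, List, Optional, Tuple
--
-- def split_uniform(
--
--     contracts: int,
--     num_slices: int,
-- ) -> List[int]:
--     """Split order into uniform-sized slices
--
--     Args:
--         contracts: Total contracts
--         num_slices: Number of slices
--
--     Returns:
--         List of contract counts per slice
--     """
--     base_size = contracts // num_slices
--     remainder = contracts % num_slices
--
--     slices = [base_size] * num_slices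
--     # Distribute remainder
--     for i in range(remainder):
--         slices[i] += 1
--
--     return slices
-- ===== SOURCE B (Python) =====
-- def split_uniform(contracts, num_slices):
--     """Split order into uniform-sized slices (greedy: each slice takes the
--     ceiling of the remaining contracts over the remaining slices)."""
--     slices = []
--     while num_slices > 0:
--         first = -(-contracts // num_slices)  # ceil division
--         slices.append(first)
--         contracts -= first
--         num_slices -= 1
--     return slices
-- ===== Notes on version B (the rewrite author's own statement) =====
-- stated objective: alternative
-- what changed: B replaces A's divmod-once-then-increment-the-first-remainder-cells scheme with a greedy single pass that, for each slice, takes the ceiling of the remaining contracts divided by the remaining slices and subtracts it; no base/remainder precomputation and no list mutation.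
import Mathlib
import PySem

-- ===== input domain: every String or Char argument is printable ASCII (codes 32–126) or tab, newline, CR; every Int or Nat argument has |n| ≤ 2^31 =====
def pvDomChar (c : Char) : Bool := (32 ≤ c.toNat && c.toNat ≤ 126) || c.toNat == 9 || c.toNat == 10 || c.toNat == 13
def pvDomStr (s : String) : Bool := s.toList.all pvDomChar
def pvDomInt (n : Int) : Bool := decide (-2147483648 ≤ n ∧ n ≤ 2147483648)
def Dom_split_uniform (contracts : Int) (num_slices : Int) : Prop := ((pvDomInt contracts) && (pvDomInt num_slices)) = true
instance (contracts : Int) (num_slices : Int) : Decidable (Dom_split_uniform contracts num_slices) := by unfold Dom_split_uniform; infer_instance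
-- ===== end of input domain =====

-- B is a greedy single pass: each slice takes the ceiling of the remaining contracts over the
-- remaining slices, instead of A's divmod-once-then-patch-the-first-r-cells (objective: alternative).

-- ===== PORT A =====
def split_uniform (contracts : Int) (num_slices : Int) : List Int :=
  let base_size := PySem.Int.floordiv contracts num_slices
  let remainder := PySem.Int.mod contracts num_slices
  let slices := Array.replicate num_slices.toNat base_size
  -- for i in range(remainder): slices[i] += 1   (the index is always in range when num_slices ≠ 0,
  -- since 0 ≤ i < remainder < num_slices; Array gives the O(1) cell update a Python list has)
  ((PySem.List.pyRange 0 remainder 1).foldl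
    (fun (a : Array Int) (i : Int) => a.setIfInBounds i.toNat (a.getD i.toNat 0 + 1)) slices).toList

-- ===== PORT B =====
-- the 'while num_slices > 0' loop of Source B, carrying (contracts, num_slices, slices)
def splitLoop (contracts : Int) (num_slices : Int) (slices : List Int) : List Int :=
  if num_slices ≤ 0 then slices
  else
    let first := -(PySem.Int.floordiv (-contracts) num_slices)   -- -(-contracts // num_slices)
    splitLoop (contracts - first) (num_slices - 1) (slices ++ [first])
termination_by num_slices.toNat
decreasing_by omega

def split_uniform_alt (contracts : Int) (num_slices : Int) : List Int :=
  splitLoop contracts num_slices []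

-- ===== PRECONDITION & SPEC =====
-- num_slices = 0 makes Python's '//' and '%' in A raise ZeroDivisionError.
def Pre_split_uniform (contracts : Int) (num_slices : Int) : Prop := num_slices ≠ 0
instance (contracts : Int) (num_slices : Int) : Decidable (Pre_split_uniform contracts num_slices) := by unfold Pre_split_uniform; infer_instance
def pvWitness_split_uniform : Int × Int := (7, 3)

def Spec_split_uniform (contracts : Int) (num_slices : Int) (out : List Int) : Prop := out = split_uniform_alt contracts num_slices
instance (contracts : Int) (num_slices : Int) (out : List Int) : Decidable (Spec_split_uniform contracts num_slices out) := by unfold Spec_split_uniform; infer_instance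

-- ===== CLAIM (what is proved, stated in full; the proofs are below) =====
def Claim_equal_split_uniform : Prop := ∀ (contracts : Int) (num_slices : Int), Dom_split_uniform contracts num_slices → Pre_split_uniform contracts num_slices → Spec_split_uniform contracts num_slices (split_uniform contracts num_slices)

-- ===== LEMMAS AND PROOFS =====

-- The array loop of port A, read through toList, is the corresponding list loop.
theorem pv_fold_toList (xs : List Int) (a : Array Int) :
    (xs.foldl (fun (a : Array Int) (i : Int) => a.setIfInBounds i.toNat (a.getD i.toNat 0 + 1)) a).toList
    = xs.foldl (fun (l : List Int) (i : Int) => l.set i.toNat (l.getD i.toNat 0 + 1)) a.toList := by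
  induction xs generalizing a with
  | nil => rfl
  | cons x xs ih =>
    simp only [List.foldl_cons, ih, Array.toList_setIfInBounds]
    congr 2
    rw [List.getD, Array.getElem?_toList, Array.getD_eq_getD_getElem?]

-- Incrementing the first r cells of a constant list yields the two-block form.
theorem pv_fold_incr (b : Int) (n r : Nat) (hr : r ≤ n) :
    (PySem.List.pyRange 0 (r : Int) 1).foldl
      (fun (l : List Int) (i : Int) => l.set i.toNat (l.getD i.toNat 0 + 1)) (List.replicate n b)
    = List.replicate r (b + 1) ++ List.replicate (n - r) b := by
  induction r with
  | zero => simp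
  | succ r ih =>
    have hr' : r ≤ n := Nat.le_of_succ_le hr
    have hsplit : PySem.List.pyRange 0 ((r : Int) + 1) 1
        = PySem.List.pyRange 0 (r : Int) 1 ++ [(r : Int)] :=
      PySem.List.pyRange_one_succ_right (by exact_mod_cast Nat.zero_le r)
    have hcast : ((r + 1 : Nat) : Int) = (r : Int) + 1 := by push_cast; ring
    rw [hcast, hsplit, List.foldl_append, ih hr']
    simp only [List.foldl_cons, List.foldl_nil, Int.toNat_natCast]
    have hget : (List.replicate r (b + 1) ++ List.replicate (n - r) b).getD r 0 = b := by
      rw [List.getD, List.getElem?_append_right (by simp)]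
      simp only [List.length_replicate, Nat.sub_self]
      have h2 : n - r = (n - r - 1) + 1 := by omega
      rw [h2, List.replicate_succ]
      simp
    rw [hget]
    rw [List.set_append_right _ _ (by simp)]
    simp only [List.length_replicate, Nat.sub_self]
    have h2 : n - r = (n - r - 1) + 1 := by omega
    rw [h2, List.replicate_succ, List.set_cons_zero]
    have h3 : List.replicate (r + 1) (b + 1) = List.replicate r (b + 1) ++ [b + 1] := by
      simp [List.replicate_succ']
    rw [h3]
    simp [List.append_assoc]
    omega

-- floor-division characterisation: q*n + s with 0 ≤ s < n has quotient q and remainder s.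
theorem pv_fdivmod_char (q s n : Int) (hn : 0 < n) (hs0 : 0 ≤ s) (hsn : s < n) :
    PySem.Int.floordiv (q * n + s) n = q ∧ PySem.Int.mod (q * n + s) n = s := by
  have hdiv : PySem.Int.floordiv (q * n + s) n = q := by
    rw [PySem.Int.floordiv_eq_iff_of_pos hn]
    constructor <;> nlinarith
  refine ⟨hdiv, ?_⟩
  have := PySem.Int.floordiv_mul_add_mod (q * n + s) n
  rw [hdiv] at this
  linarith

-- B's greedy loop produces the two-block form, for positive num_slices.
theorem pv_splitLoop_eq (N : Nat) : ∀ (c n : Int) (acc : List Int), n.toNat = N → 0 < n →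
    splitLoop c n acc
      = acc ++ List.replicate (PySem.Int.mod c n).toNat (PySem.Int.floordiv c n + 1)
            ++ List.replicate ((n - PySem.Int.mod c n).toNat) (PySem.Int.floordiv c n) := by
  induction N using Nat.strong_induction_on with
  | _ N ih =>
    intro c n acc hN hn
    set b := PySem.Int.floordiv c n with hb
    set r := PySem.Int.mod c n with hr
    have hc : b * n + r = c := PySem.Int.floordiv_mul_add_mod c n
    have hr0 : 0 ≤ r := PySem.Int.mod_nonneg c hn
    have hrn : r < n := PySem.Int.mod_lt c hn
    rw [splitLoop]
    rw [if_neg (by omega)]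
    have hfirst : -(PySem.Int.floordiv (-c) n) = if r = 0 then b else b + 1 := by
      rw [PySem.Int.neg_floordiv_neg_eq_iff_of_pos hn]
      have e1 : (b - 1) * n = b * n - n := by ring
      have e2 : (b + 1 - 1) * n = b * n := by ring
      have e3 : (b + 1) * n = b * n + n := by ring
      split_ifs with h0
      · exact ⟨by linarith, by linarith⟩
      · have hrpos : 0 < r := by omega
        exact ⟨by linarith, by linarith⟩
    simp only [hfirst]
    by_cases h0 : r = 0
    · rw [if_pos h0]
      by_cases h1 : n = 1
      · -- last iteration: the recursive call returns its accumulator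
        rw [splitLoop, if_pos (by omega)]
        simp [h0, h1]
      · have hn1 : 0 < n - 1 := by omega
        have hq : PySem.Int.floordiv (c - b) (n - 1) = b ∧ PySem.Int.mod (c - b) (n - 1) = 0 := by
          have : c - b = b * (n - 1) + 0 := by linarith
          rw [this]; exact pv_fdivmod_char b 0 (n - 1) hn1 le_rfl hn1
        rw [ih (n - 1).toNat (by omega) (c - b) (n - 1) (acc ++ [b]) rfl hn1, hq.1, hq.2]
        simp only [h0]
        simp
        obtain ⟨m, hm⟩ : ∃ m, n.toNat = m + 1 := ⟨n.toNat - 1, by omega⟩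
        simp [hm, List.replicate_succ]
    · rw [if_neg h0]
      have hn1 : 0 < n - 1 := by omega
      have hq : PySem.Int.floordiv (c - (b + 1)) (n - 1) = b
          ∧ PySem.Int.mod (c - (b + 1)) (n - 1) = r - 1 := by
        have : c - (b + 1) = b * (n - 1) + (r - 1) := by linarith
        rw [this]; exact pv_fdivmod_char b (r - 1) (n - 1) hn1 (by omega) (by omega)
      rw [ih (n - 1).toNat (by omega) (c - (b + 1)) (n - 1) (acc ++ [b + 1]) rfl hn1, hq.1, hq.2]
      have h2 : r.toNat = (r - 1).toNat + 1 := by omega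
      have h3 : (n - 1 - (r - 1)).toNat = (n - r).toNat := by omega
      rw [h2, h3]
      simp [List.replicate_succ, List.append_assoc]

-- ===== VERDICT (by name: the statement is the Claim_ definition above) =====
theorem split_uniform_spec : Claim_equal_split_uniform := by
  intro contracts num_slices _ hpre
  unfold Spec_split_uniform split_uniform split_uniform_alt
  simp only []
  set b := PySem.Int.floordiv contracts num_slices with hb
  set r := PySem.Int.mod contracts num_slices with hrm
  rcases lt_or_gt_of_ne hpre with hneg | hpos
  · -- num_slices < 0 : remainder ≤ 0, both sides are the empty list
    have hrle : r ≤ 0 := (PySem.Int.mod_neg_bounds contracts hneg).2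
    have hns : num_slices.toNat = 0 := by omega
    rw [pv_fold_toList, PySem.List.pyRange_one_eq_nil hrle, hns, splitLoop,
      if_pos (le_of_lt hneg)]
    simp
  · -- num_slices > 0 : both sides are the two-block form
    have hr0 : 0 ≤ r := PySem.Int.mod_nonneg contracts hpos
    have hrlt : r < num_slices := PySem.Int.mod_lt contracts hpos
    have hcast : r = ((r.toNat : Nat) : Int) := by omega
    rw [pv_fold_toList, Array.toList_replicate, hcast,
      pv_fold_incr b num_slices.toNat r.toNat (by omega),
      pv_splitLoop_eq num_slices.toNat contracts num_slices [] rfl hpos]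
    simp only [← hb, ← hrm, List.nil_append]
    congr 2
    omega
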